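-- pv_equiv track=rewrite | github.com/alexgrist14/SuptechHelper-Extension | main.py | spiosk_bez_not
-- ===== SOURCE A (Python) =====
-- def spiosk_bez_not(spiosk):
--     spiosk_new = []
--     for value in spiosk:
--         if value[0] in ('or', 'and'):
--             spiosk_new.append(value[0])
--     if spiosk_new:
--         return spiosk_new[-1]
--     else:
--         return 'and'
-- ===== SOURCE B (Python) =====
-- def spiosk_bez_not(spiosk):
--     for value in reversed(list(spiosk)):
--         if value[0] in ('or', 'and'):
--             return value[0]
--     return 'and'
-- ===== Notes on version B (the rewrite author's own statement) =====
-- stated objective: simpler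
-- what changed: Instead of collecting all matches into an intermediate list and taking its last element, B scans the input in reverse and returns the first 'or'/'and' head it finds, short-circuiting; 'and' if none.
import Mathlib
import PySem

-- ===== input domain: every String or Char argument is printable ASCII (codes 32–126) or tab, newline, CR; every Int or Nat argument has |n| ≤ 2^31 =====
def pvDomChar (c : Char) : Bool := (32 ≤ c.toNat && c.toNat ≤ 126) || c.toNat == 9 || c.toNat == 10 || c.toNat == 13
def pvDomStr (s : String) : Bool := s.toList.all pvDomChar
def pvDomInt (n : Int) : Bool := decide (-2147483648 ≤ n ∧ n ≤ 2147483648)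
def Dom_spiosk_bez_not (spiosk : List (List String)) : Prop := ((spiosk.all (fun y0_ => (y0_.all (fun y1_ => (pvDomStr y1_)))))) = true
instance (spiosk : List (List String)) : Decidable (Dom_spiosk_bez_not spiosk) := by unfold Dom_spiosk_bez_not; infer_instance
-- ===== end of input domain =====

-- B replaces A's collect-all-matches-then-take-last with a short-circuiting reverse scan (objective: simpler); same return value on Pre_.

-- ===== PORT A =====
-- step of A's for-loop: value[0] (IndexError on empty value, none here) appended when it is 'or'/'and'
def spioskStepA (acc : List String) (value : List String) : List String :=
  match PySem.List.pyGet? value 0 with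
  | some h => if h = "or" ∨ h = "and" then acc ++ [h] else acc
  | none => acc

def spiosk_bez_not (spiosk : List (List String)) : String :=
  let spiosk_new := spiosk.foldl spioskStepA []
  match spiosk_new.getLast? with
  | some x => x
  | none => "and"

-- ===== PORT B =====
-- B's loop over reversed(list(spiosk)): return first 'or'/'and' head
def spioskLoopB : List (List String) → String
  | [] => "and"
  | value :: rest =>
    match PySem.List.pyGet? value 0 with
    | some h => if h = "or" ∨ h = "and" then h else spioskLoopB rest
    | none => spioskLoopB rest

def spiosk_bez_not_alt (spiosk : List (List String)) : String :=
  spioskLoopB spiosk.reverse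

-- ===== PRECONDITION & SPEC =====
-- Pre_ excludes inputs containing an empty inner list, on which Python A raises IndexError at value[0].
def Pre_spiosk_bez_not (spiosk : List (List String)) : Prop := ∀ v ∈ spiosk, v ≠ []
instance (spiosk : List (List String)) : Decidable (Pre_spiosk_bez_not spiosk) := by unfold Pre_spiosk_bez_not; infer_instance

def pvWitness_spiosk_bez_not : List (List String) := [["and", "x"], ["y"], ["or"]]

def Spec_spiosk_bez_not (spiosk : List (List String)) (out : String) : Prop := out = spiosk_bez_not_alt spiosk
instance (spiosk : List (List String)) (out : String) : Decidable (Spec_spiosk_bez_not spiosk out) := by unfold Spec_spiosk_bez_not; infer_instance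

-- ===== CLAIM (what is proved, stated in full; the proofs are below) =====
def Claim_equal_spiosk_bez_not : Prop := ∀ (spiosk : List (List String)), Dom_spiosk_bez_not spiosk → Pre_spiosk_bez_not spiosk → Spec_spiosk_bez_not spiosk (spiosk_bez_not spiosk)

-- ===== LEMMAS AND PROOFS =====
-- the match extractor both ports implement
def spioskF (value : List String) : Option String :=
  match PySem.List.pyGet? value 0 with
  | some h => if h = "or" ∨ h = "and" then some h else none
  | none => none

theorem spiosk_fold_eq (l : List (List String)) :
    ∀ acc, l.foldl spioskStepA acc = acc ++ l.filterMap spioskF := by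
  induction l with
  | nil => simp
  | cons v t ih =>
    intro acc
    simp only [List.foldl_cons, List.filterMap_cons, ih, spioskStepA, spioskF]
    cases PySem.List.pyGet? v 0 with
    | none => simp
    | some h => by_cases hh : h = "or" ∨ h = "and" <;> simp [hh]

theorem spiosk_loopB_eq (r : List (List String)) :
    spioskLoopB r = ((r.filterMap spioskF).head?).getD "and" := by
  induction r with
  | nil => rfl
  | cons v t ih =>
    simp only [spioskLoopB, List.filterMap_cons, spioskF]
    cases PySem.List.pyGet? v 0 with
    | none => simpa using ih
    | some h => by_cases hh : h = "or" ∨ h = "and" <;> simp [hh, ih, spioskF]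

-- ===== VERDICT (by name: the statement is the Claim_ definition above) =====
theorem spiosk_bez_not_spec : Claim_equal_spiosk_bez_not := by
  intro spiosk _ _
  unfold Spec_spiosk_bez_not spiosk_bez_not spiosk_bez_not_alt
  rw [spiosk_fold_eq, spiosk_loopB_eq, List.filterMap_reverse]
  simp only [List.nil_append]
  rw [List.getLast?_eq_head?_reverse]
  cases (spiosk.filterMap spioskF).reverse.head? <;> rfl
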